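-- pv_equiv track=rewrite | github.com/bsuraj23/tenthirty | file 5/Setoperations.py | custom_filter
-- ===== SOURCE A (Python) =====
-- def custom_filter(nums):
--     result = []
--     for n in nums:
--         if n < 0:
--             break
--         if n % 3 == 0:
--             continue
--         result.append(n)
--     return result
-- ===== SOURCE B (Python) =====
-- def custom_filter(nums):
--     # Divide and conquer: each segment yields (kept values, whether a negative
--     # stopped processing inside it); a stopped left half discards the right half.
--     def go(seg):
--         if not seg:
--             return [], False
--         if len(seg) == 1:
--             n = seg[0]
--             if n < 0:
--                 return [], True
--             return ([] if n % 3 == 0 else [n]), False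
--         mid = len(seg) // 2
--         left, stopped = go(seg[:mid])
--         if stopped:
--             return left, True
--         right, stopped = go(seg[mid:])
--         return left + right, stopped
--     return go(nums)[0]
-- ===== Notes on version B (the rewrite author's own statement) =====
-- stated objective: alternative
-- what changed: A's single left-to-right loop with break/continue is replaced by a divide-and-conquer recursion: each half returns its kept values plus a stop flag, and a stopped left half discards the right half.
import Mathlib
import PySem

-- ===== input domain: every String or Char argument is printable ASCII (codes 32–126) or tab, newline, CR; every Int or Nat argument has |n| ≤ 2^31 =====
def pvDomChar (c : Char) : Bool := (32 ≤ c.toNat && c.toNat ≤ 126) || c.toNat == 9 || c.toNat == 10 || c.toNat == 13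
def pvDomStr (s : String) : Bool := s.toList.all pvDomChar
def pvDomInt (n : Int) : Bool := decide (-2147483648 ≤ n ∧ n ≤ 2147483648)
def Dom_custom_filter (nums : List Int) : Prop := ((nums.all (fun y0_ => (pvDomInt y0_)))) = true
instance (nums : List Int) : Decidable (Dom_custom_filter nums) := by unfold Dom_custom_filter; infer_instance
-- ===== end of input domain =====

-- B replaces A's single left-to-right loop (break/continue) by a divide-and-conquer
-- recursion returning (kept values, stop flag); objective: alternative, same values.

-- ===== PORT A =====
-- A's loop with the `result` accumulator; `break` returns the accumulator so far.
def customFilterLoop (result : List Int) (rest : List Int) : List Int :=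
  match rest with
  | [] => result
  | n :: rest' =>
    if n < 0 then result
    else if n % 3 = 0 then customFilterLoop result rest'
    else customFilterLoop (result ++ [n]) rest'

def custom_filter (nums : List Int) : List Int := customFilterLoop [] nums

-- ===== PORT B =====
-- go(seg) from Source B: splits the segment at len//2, a stopped left half discards the right.
def cfGo : List Int → List Int × Bool
  | [] => ([], false)
  | [n] => if n < 0 then ([], true) else if n % 3 = 0 then ([], false) else ([n], false)
  | a :: b :: rest =>
    let seg := a :: b :: rest
    let mid := seg.length / 2
    let l := cfGo (seg.take mid)
    if l.2 then (l.1, true)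
    else
      let r := cfGo (seg.drop mid)
      (l.1 ++ r.1, r.2)
termination_by l => l.length
decreasing_by
  · simp [List.length_take]; omega
  · simp [List.length_drop]; omega

def custom_filter_alt (nums : List Int) : List Int := (cfGo nums).1

-- ===== PRECONDITION & SPEC =====
def Spec_custom_filter (nums : List Int) (out : List Int) : Prop := out = custom_filter_alt nums
instance (nums : List Int) (out : List Int) : Decidable (Spec_custom_filter nums out) := by unfold Spec_custom_filter; infer_instance

-- ===== CLAIM (what is proved, stated in full; the proofs are below) =====
def Claim_equal_custom_filter : Prop := ∀ (nums : List Int), Dom_custom_filter nums → Spec_custom_filter nums (custom_filter nums)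

-- ===== LEMMAS AND PROOFS =====
-- Linear characterisation of A's break/continue loop.
def cfLin : List Int → List Int
  | [] => []
  | n :: rest => if n < 0 then [] else if n % 3 = 0 then cfLin rest else n :: cfLin rest

theorem customFilterLoop_acc (acc rest : List Int) :
    customFilterLoop acc rest = acc ++ cfLin rest := by
  induction rest generalizing acc with
  | nil => simp [customFilterLoop, cfLin]
  | cons n rest' ih =>
    by_cases hneg : n < 0
    · simp [customFilterLoop, cfLin, hneg]
    · by_cases h3 : n % 3 = 0
      · simp [customFilterLoop, cfLin, hneg, h3, ih]
      · simp [customFilterLoop, cfLin, hneg, h3, ih]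

theorem cfLin_append (l1 l2 : List Int) :
    cfLin (l1 ++ l2) =
      if l1.any (fun n => decide (n < 0)) then cfLin l1 else cfLin l1 ++ cfLin l2 := by
  induction l1 with
  | nil => simp [cfLin]
  | cons n rest ih =>
    by_cases hneg : n < 0
    · simp [cfLin, hneg]
    · by_cases h3 : n % 3 = 0 <;>
        by_cases hr : rest.any (fun n => decide (n < 0)) <;>
          simp [cfLin, hneg, h3, ih, hr]

theorem cfGo_eq (seg : List Int) :
    cfGo seg = (cfLin seg, seg.any (fun n => decide (n < 0))) := by
  induction seg using cfGo.induct with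
  | case1 => simp [cfGo, cfLin]
  | case2 n hneg => simp [cfGo, cfLin, hneg]
  | case3 n hneg h3 => simp [cfGo, cfLin, hneg, h3]
  | case4 n hneg h3 => simp [cfGo, cfLin, hneg, h3]
  | case5 a b rest _seg _mid _l hstop ih =>
    rw [cfGo]
    set T := List.take ((a :: b :: rest).length / 2) (a :: b :: rest) with hT
    set Dr := List.drop ((a :: b :: rest).length / 2) (a :: b :: rest) with hD
    have ih' : cfGo T = (cfLin T, T.any fun n => decide (n < 0)) := ih
    have hstop2 : (T.any fun n => decide (n < 0)) = true := by
      have h : (cfGo T).2 = true := hstop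
      rw [ih'] at h; exact h
    have hsplit : a :: b :: rest = T ++ Dr := (List.take_append_drop _ _).symm
    rw [ih']
    conv_rhs => rw [hsplit, cfLin_append, List.any_append]
    simp [hstop2]
  | case6 a b rest _seg _mid _l hstop ih1 ih2 =>
    rw [cfGo]
    set T := List.take ((a :: b :: rest).length / 2) (a :: b :: rest) with hT
    set Dr := List.drop ((a :: b :: rest).length / 2) (a :: b :: rest) with hD
    have ih1' : cfGo T = (cfLin T, T.any fun n => decide (n < 0)) := ih1
    have ih2' : cfGo Dr = (cfLin Dr, Dr.any fun n => decide (n < 0)) := ih2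
    have hstop2 : (T.any fun n => decide (n < 0)) = false := by
      have h : ¬ (cfGo T).2 = true := hstop
      rw [ih1'] at h; simpa using h
    have hsplit : a :: b :: rest = T ++ Dr := (List.take_append_drop _ _).symm
    rw [ih1', ih2']
    conv_rhs => rw [hsplit, cfLin_append, List.any_append]
    simp [hstop2]

-- ===== VERDICT (by name: the statement is the Claim_ definition above) =====
theorem custom_filter_spec : Claim_equal_custom_filter := by
  intro nums _
  show custom_filter nums = custom_filter_alt nums
  simp [custom_filter, custom_filter_alt, cfGo_eq, customFilterLoop_acc]
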